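-- pv_equiv track=rewrite | github.com/xlhuang1/interview_prep | prefix_sum8-subarrays_with_bounded_max.py | subarrays_with_max
-- ===== SOURCE A (Python) =====
-- def subarrays_with_max(nums, left, right):
--     start = 0
--     prev_valid_count = 0
--     total = 0
--
--     for i, x in enumerate(nums):
--         if x > right:
--             start = i + 1
--             prev_valid_count = 0
--         elif x < left:
--             total += prev_valid_count
--         else:  # x in [left, right]
--             prev_valid_count = i - start + 1
--             total += prev_valid_count
--     return total
-- ===== SOURCE B (Python) =====
-- def subarrays_with_max(nums, left, right):
--     def count(pred):
--         length = 0
--         total = 0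
--         for x in nums:
--             if pred(x):
--                 length += 1
--                 total += length
--             else:
--                 length = 0
--         return total
--     return count(lambda x: x <= right) - count(lambda x: x <= right and x < left)
-- ===== Notes on version B (the rewrite author's own statement) =====
-- stated objective: alternative
-- what changed: Replaces A's single fused pass with start/prev_valid_count state by the standard difference-of-counts decomposition: one helper that sums run lengths of elements satisfying a predicate, called twice (x <= right, and x <= right and x < left) and subtracted.
import Mathlib
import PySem

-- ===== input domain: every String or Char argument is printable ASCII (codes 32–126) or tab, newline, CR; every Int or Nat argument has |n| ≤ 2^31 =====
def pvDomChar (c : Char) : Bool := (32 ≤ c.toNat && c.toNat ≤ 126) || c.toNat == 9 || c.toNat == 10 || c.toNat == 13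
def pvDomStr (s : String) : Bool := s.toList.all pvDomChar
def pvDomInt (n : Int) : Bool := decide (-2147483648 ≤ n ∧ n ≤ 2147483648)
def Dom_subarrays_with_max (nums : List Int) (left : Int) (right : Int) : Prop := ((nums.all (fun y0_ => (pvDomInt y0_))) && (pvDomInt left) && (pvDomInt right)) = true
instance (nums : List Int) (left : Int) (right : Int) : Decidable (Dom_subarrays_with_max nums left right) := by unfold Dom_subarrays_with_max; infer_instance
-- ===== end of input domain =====

-- B replaces A's fused single pass (start/prev_valid_count state) by the standard
-- difference-of-counts decomposition: sum of run lengths for x ≤ right minus for (x ≤ right ∧ x < left).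


-- ===== PORT A =====
-- A's for-loop over enumerate(nums) as structural recursion carrying (i, start, prev_valid_count, total)
def subA_go (left right : Int) : List Int → Int → Int → Int → Int → Int
  | [], _, _, _, total => total
  | x :: xs, i, start, prev, total =>
    if x > right then subA_go left right xs (i + 1) (i + 1) 0 total
    else if x < left then subA_go left right xs (i + 1) start prev (total + prev)
    else subA_go left right xs (i + 1) start (i - start + 1) (total + (i - start + 1))

def subarrays_with_max (nums : List Int) (left : Int) (right : Int) : Int :=
  subA_go left right nums 0 0 0 0

-- ===== PORT B =====
-- B's helper count(pred): one pass keeping (length, total) of current run of elements satisfying pred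
def countRun_go (pred : Int → Bool) : List Int → Int → Int → Int
  | [], _, total => total
  | x :: xs, length, total =>
    if pred x then countRun_go pred xs (length + 1) (total + (length + 1))
    else countRun_go pred xs 0 total

def subarrays_with_max_alt (nums : List Int) (left : Int) (right : Int) : Int :=
  countRun_go (fun x => x ≤ right) nums 0 0
    - countRun_go (fun x => x ≤ right && x < left) nums 0 0

-- ===== PRECONDITION & SPEC =====
def Spec_subarrays_with_max (nums : List Int) (left : Int) (right : Int) (out : Int) : Prop := out = subarrays_with_max_alt nums left right
instance (nums : List Int) (left : Int) (right : Int) (out : Int) : Decidable (Spec_subarrays_with_max nums left right out) := by unfold Spec_subarrays_with_max; infer_instance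

-- ===== CLAIM (what is proved, stated in full; the proofs are below) =====
def Claim_equal_subarrays_with_max : Prop := ∀ (nums : List Int) (left : Int) (right : Int), Dom_subarrays_with_max nums left right → Spec_subarrays_with_max nums left right (subarrays_with_max nums left right)

-- ===== LEMMAS AND PROOFS =====
-- Loop invariant tying A's state (start, prev, total) to B's two run scans:
-- start = i - len1, prev = len1 - len2, total = t1 - t2.
theorem subA_go_eq (left right : Int) :
    ∀ (xs : List Int) (i start prev total len1 len2 t1 t2 : Int),
      start = i - len1 → prev = len1 - len2 → total = t1 - t2 →
      subA_go left right xs i start prev total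
        = countRun_go (fun x => x ≤ right) xs len1 t1
            - countRun_go (fun x => x ≤ right && x < left) xs len2 t2 := by
  intro xs
  induction xs with
  | nil =>
    intro i start prev total len1 len2 t1 t2 h1 h2 h3
    simp [subA_go, countRun_go]; omega
  | cons x xs ih =>
    intro i start prev total len1 len2 t1 t2 h1 h2 h3
    by_cases hr : x > right
    · have hb1 : decide (x ≤ right) = false := by simp; omega
      simp only [subA_go, countRun_go, if_pos hr, hb1, Bool.false_and, Bool.false_eq_true,
        if_false]
      exact ih (i + 1) (i + 1) 0 total 0 0 t1 t2 (by omega) (by omega) (by omega)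
    · have hb1 : decide (x ≤ right) = true := by simp; omega
      by_cases hl : x < left
      · have hb2 : decide (x < left) = true := by simp [hl]
        simp only [subA_go, countRun_go, if_neg hr, if_pos hl, hb1, hb2, Bool.and_self, if_true]
        exact ih (i + 1) start prev (total + prev) (len1 + 1) (len2 + 1)
          (t1 + (len1 + 1)) (t2 + (len2 + 1)) (by omega) (by omega) (by omega)
      · have hb2 : decide (x < left) = false := by simp [hl]
        simp only [subA_go, countRun_go, if_neg hr, if_neg hl, hb1, hb2, Bool.true_and,
          Bool.false_eq_true, if_false, if_true]
        exact ih (i + 1) start (i - start + 1) (total + (i - start + 1)) (len1 + 1) 0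
          (t1 + (len1 + 1)) t2 (by omega) (by omega) (by omega)

-- ===== VERDICT (by name: the statement is the Claim_ definition above) =====
theorem subarrays_with_max_spec : Claim_equal_subarrays_with_max := by
  intro nums left right _
  unfold Spec_subarrays_with_max subarrays_with_max subarrays_with_max_alt
  exact subA_go_eq left right nums 0 0 0 0 0 0 0 0 rfl rfl rfl
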